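-- pv_equiv track=rewrite | github.com/shrutiashok7/ap-final-assignment | q3.py | firstLetters
-- ===== SOURCE A (Python) =====
-- def firstLetters(s):
--     result = ''
--     is_new_word = True
--
--     for char in s:
--         if char == ' ':
--             is_new_word = True
--         elif is_new_word:
--             result += char
--             is_new_word = False
--
--     return result
-- ===== SOURCE B (Python) =====
-- def firstLetters(s):
--     return ''.join(w[0] for w in s.split(' ') if w)
-- ===== Notes on version B (the rewrite author's own statement) =====
-- stated objective: idiomatic
-- what changed: Replaces the character-by-character scan with an is_new_word flag by splitting on the literal space character and joining the first character of each non-empty fragment.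
import Mathlib
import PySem

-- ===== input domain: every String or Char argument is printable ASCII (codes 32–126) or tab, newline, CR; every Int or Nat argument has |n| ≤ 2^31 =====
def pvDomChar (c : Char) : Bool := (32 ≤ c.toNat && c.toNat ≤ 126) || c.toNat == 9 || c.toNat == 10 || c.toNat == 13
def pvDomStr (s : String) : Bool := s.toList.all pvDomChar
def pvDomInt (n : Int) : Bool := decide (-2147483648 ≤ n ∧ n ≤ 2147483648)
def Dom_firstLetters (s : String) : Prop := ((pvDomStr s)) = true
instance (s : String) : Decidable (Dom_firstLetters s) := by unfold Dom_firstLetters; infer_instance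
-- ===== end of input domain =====

-- B collects the first letter of each space-separated word by split-then-map instead of
-- A's char scan with an is_new_word flag (objective: idiomatic; same O(n) cost).

-- ===== PORT A =====
-- char-by-char loop over the string with accumulator (result, is_new_word)
def firstLetters (s : String) : String :=
  String.ofList
    ((s.toList.foldl
      (fun st c =>
        if c = ' ' then (st.1, true)
        else if st.2 then (st.1 ++ [c], false)
        else st)
      (([] : List Char), true)).1)

-- ===== PORT B =====
-- s.split(' '), keep non-empty fragments, take each fragment's first character, ''.join
def firstLetters_alt (s : String) : String :=
  String.ofList
    (PySem.Chars.join []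
      (((PySem.Chars.splitOn s.toList [' ']).filter (fun w => !w.isEmpty)).map
        (fun w => w.take 1)))

-- ===== PRECONDITION & SPEC =====
def Spec_firstLetters (s : String) (out : String) : Prop := out = firstLetters_alt s
instance (s : String) (out : String) : Decidable (Spec_firstLetters s out) := by unfold Spec_firstLetters; infer_instance

-- ===== CLAIM (what is proved, stated in full; the proofs are below) =====
def Claim_equal_firstLetters : Prop := ∀ (s : String), Dom_firstLetters s → Spec_firstLetters s (firstLetters s)

-- ===== LEMMAS AND PROOFS =====

-- reference recursive form of Python's split(' '): mySplit pre l prepends the pending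
-- fragment pre (already in order) to the first piece
def mySplit (pre : List Char) : List Char → List (List Char)
  | [] => [pre]
  | c :: t => if c = ' ' then pre :: mySplit [] t else mySplit (pre ++ [c]) t

lemma go_space_eq (fuel : Nat) (l cur : List Char) (acc : List (List Char)) (h : l.length ≤ fuel) :
    PySem.Chars.splitOn.go [' '] fuel l cur acc = acc.reverse ++ mySplit cur.reverse l := by
  induction fuel generalizing l cur acc with
  | zero =>
    have : l = [] := List.eq_nil_of_length_eq_zero (Nat.le_zero.mp h)
    subst this
    simp [PySem.Chars.splitOn.go, mySplit]
  | succ n ih =>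
    cases l with
    | nil => simp [PySem.Chars.splitOn.go, mySplit]
    | cons c t =>
      by_cases hc : c = ' '
      · subst hc
        have hpre : List.isPrefixOf [' '] (' ' :: t) = true := by
          simp [List.isPrefixOf]
        simp only [PySem.Chars.splitOn.go, hpre, if_pos]
        rw [ih _ _ _ (by simpa using Nat.le_of_succ_le_succ h)]
        simp [mySplit]
      · have hpre : List.isPrefixOf [' '] (c :: t) = false := by
          simp [List.isPrefixOf, Ne.symm hc]
        simp only [PySem.Chars.splitOn.go, hpre, Bool.false_eq_true, if_false]
        rw [ih _ _ _ (by simpa using Nat.le_of_succ_le_succ h)]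
        simp [mySplit, hc]

lemma splitOn_space (l : List Char) :
    PySem.Chars.splitOn l [' '] = mySplit [] l := by
  unfold PySem.Chars.splitOn
  rw [go_space_eq _ _ _ _ (Nat.le_succ_of_le (Nat.le_refl _))]
  simp

-- B's value as a function of the word list
def gB (pre l : List Char) : List Char :=
  PySem.Chars.join [] (((mySplit pre l).filter (fun w => !w.isEmpty)).map (fun w => w.take 1))

lemma join_nil_eq_flatten (ps : List (List Char)) : PySem.Chars.join [] ps = ps.flatten := by
  simp [PySem.Chars.join, List.intercalate]
  induction ps with
  | nil => simp
  | cons a t ih => cases t <;> simp_all [List.intersperse]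

lemma gB_nil (pre : List Char) : gB pre [] = pre.take 1 := by
  by_cases h : pre = [] <;>
    simp [gB, mySplit, h]

lemma gB_space (pre t : List Char) : gB pre (' ' :: t) = pre.take 1 ++ gB [] t := by
  by_cases h : pre = [] <;>
    simp [gB, mySplit, h, join_nil_eq_flatten]

lemma gB_char (pre t : List Char) (c : Char) (hc : c ≠ ' ') :
    gB pre (c :: t) = gB (pre ++ [c]) t := by
  simp [gB, mySplit, hc]

-- A's loop, with the result accumulator factored out
def hA (flag : Bool) : List Char → List Char
  | [] => []
  | c :: t => if c = ' ' then hA true t else if flag then c :: hA false t else hA false t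

lemma foldl_eq_hA (l res : List Char) (flag : Bool) :
    (l.foldl
      (fun st c =>
        if c = ' ' then (st.1, true)
        else if st.2 then (st.1 ++ [c], false)
        else st)
      (res, flag)).1 = res ++ hA flag l := by
  induction l generalizing res flag with
  | nil => simp [hA]
  | cons c t ih =>
    by_cases hc : c = ' '
    · simp [hA, hc, ih]
    · cases flag <;> simp [hA, hc, ih]

lemma hA_eq_gB (l : List Char) :
    hA true l = gB [] l ∧ ∀ pre : List Char, pre ≠ [] → pre.take 1 ++ hA false l = gB pre l := by
  induction l with
  | nil =>
    refine ⟨by simp [hA, gB_nil], fun pre hpre => by simp [hA, gB_nil]⟩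
  | cons c t ih =>
    obtain ⟨ih1, ih2⟩ := ih
    by_cases hc : c = ' '
    · subst hc
      refine ⟨by simpa [hA, gB_space] using ih1, fun pre hpre => ?_⟩
      simp [hA, gB_space, ih1]
    · constructor
      · have := ih2 [c] (by simp)
        simpa [hA, hc, gB_char _ _ _ hc] using this
      · intro pre hpre
        have key := ih2 (pre ++ [c]) (by simp)
        have htake : (pre ++ [c]).take 1 = pre.take 1 := by
          cases pre with
          | nil => simp_all
          | cons a b => simp
        calc pre.take 1 ++ hA false (c :: t)
            = (pre ++ [c]).take 1 ++ hA false t := by rw [htake]; simp [hA, hc]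
          _ = gB (pre ++ [c]) t := key
          _ = gB pre (c :: t) := (gB_char pre t c hc).symm

-- ===== VERDICT (by name: the statement is the Claim_ definition above) =====
theorem firstLetters_spec : Claim_equal_firstLetters := by
  intro s _
  unfold Spec_firstLetters firstLetters firstLetters_alt
  rw [splitOn_space, foldl_eq_hA, (hA_eq_gB s.toList).1]
  rfl
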